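-- pv_equiv track=rewrite | github.com/ilernetworklleida/editor | app/main.py | _args_to_text
-- ===== SOURCE A (Python) =====
-- def _args_to_text(args: list) -> str:
--     """Convierte ['--style','hype','--grade','vivid'] -> texto multilinea."""
--     out = []
--     i = 0
--     while i < len(args):
--         a = args[i]
--         if not a.startswith("--"):
--             i += 1
--             continue
--         is_bool = a in {"--equal", "--no-hook", "--duck", "--translate-en"}
--         if is_bool or i + 1 >= len(args) or args[i + 1].startswith("--"):
--             out.append(a)
--             i += 1
--         else:
--             out.append(f"{a} {args[i + 1]}")
--             i += 2
--     return "\n".join(out)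
-- ===== SOURCE B (Python) =====
-- def _args_to_text(args: list) -> str:
--     """Convierte ['--style','hype','--grade','vivid'] -> texto multilinea."""
--     BOOL = {"--equal", "--no-hook", "--duck", "--translate-en"}
--     out = []
--     pending = None
--     for tok in args:
--         if tok.startswith("--"):
--             if pending is not None:
--                 out.append(pending)
--                 pending = None
--             if tok in BOOL:
--                 out.append(tok)
--             else:
--                 pending = tok
--         elif pending is not None:
--             out.append(f"{pending} {tok}")
--             pending = None
--     if pending is not None:
--         out.append(pending)
--     return "\n".join(out)
-- ===== Notes on version B (the rewrite author's own statement) =====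
-- stated objective: alternative
-- what changed: Replaced the index-based while loop with variable step (i+=1/i+=2, lookahead at args[i+1]) by a single forward for-loop state machine that keeps a 'pending' flag awaiting its value and flushes it on the next flag, on a value token, or after the loop.
import Mathlib
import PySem

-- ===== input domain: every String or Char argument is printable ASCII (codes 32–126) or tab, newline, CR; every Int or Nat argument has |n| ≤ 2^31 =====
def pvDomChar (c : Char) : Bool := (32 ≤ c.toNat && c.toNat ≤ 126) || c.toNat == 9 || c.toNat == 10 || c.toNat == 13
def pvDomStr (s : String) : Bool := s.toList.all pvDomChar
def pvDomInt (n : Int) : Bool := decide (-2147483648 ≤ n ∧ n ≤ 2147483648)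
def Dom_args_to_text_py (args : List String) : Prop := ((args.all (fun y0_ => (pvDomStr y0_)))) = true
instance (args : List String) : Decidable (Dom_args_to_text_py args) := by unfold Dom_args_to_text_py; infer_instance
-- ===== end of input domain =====

-- B replaces A's variable-step index loop (lookahead, i+=1/i+=2) by a one-token-at-a-time
-- state machine with a 'pending' flag; alternative decomposition, same O(n) cost.

-- ===== PORT A =====
-- a.startswith("--")
def pvIsFlag (s : String) : Bool := PySem.Str.startswith s "--"
-- a in {"--equal", "--no-hook", "--duck", "--translate-en"}
def pvIsBool (s : String) : Bool := ["--equal", "--no-hook", "--duck", "--translate-en"].contains s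

-- A's while loop over index i: each iteration consumes one token (i += 1) or two (i += 2);
-- ported as recursion consuming one or two list elements, branches in source order.
def pvALoop (l : List String) (out : List String) : List String :=
  match l with
  | [] => out
  | a :: rest =>
    if pvIsFlag a = false then
      pvALoop rest out
    else
      let is_bool := pvIsBool a
      match rest with
      | [] =>
        -- is_bool or i + 1 >= len(args): append a, i += 1 (loop then ends)
        out ++ [a]
      | b :: rest2 =>
        if is_bool || pvIsFlag b then
          pvALoop (b :: rest2) (out ++ [a])
        else
          pvALoop rest2 (out ++ [a ++ " " ++ b])
  termination_by l.length

def args_to_text_py (args : List String) : String :=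
  PySem.Str.join "\n" (pvALoop args [])

-- ===== PORT B =====
-- one state-machine step of Source B's for-loop: state = (out, pending)
def pvBStep (st : List String × Option String) (tok : String) : List String × Option String :=
  let (out, pending) := st
  if pvIsFlag tok then
    let out := match pending with
      | some p => out ++ [p]
      | none => out
    if pvIsBool tok then (out ++ [tok], none)
    else (out, some tok)
  else
    match pending with
    | some p => (out ++ [p ++ " " ++ tok], none)
    | none => (out, none)

-- post-loop flush of a leftover pending flag
def pvBFlush (st : List String × Option String) : List String :=
  match st with
  | (out, some p) => out ++ [p]
  | (out, none) => out

def args_to_text_py_alt (args : List String) : String :=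
  PySem.Str.join "\n" (pvBFlush (args.foldl pvBStep ([], none)))

-- ===== PRECONDITION & SPEC =====
def Spec_args_to_text_py (args : List String) (out : String) : Prop := out = args_to_text_py_alt args
instance (args : List String) (out : String) : Decidable (Spec_args_to_text_py args out) := by unfold Spec_args_to_text_py; infer_instance

-- ===== CLAIM (what is proved, stated in full; the proofs are below) =====
def Claim_equal_args_to_text_py : Prop := ∀ (args : List String), Dom_args_to_text_py args → Spec_args_to_text_py args (args_to_text_py args)

-- ===== LEMMAS AND PROOFS =====

-- unfold equations of A's loop (one per branch of the while body)
theorem pvL_nil (out : List String) : pvALoop [] out = out := by rw [pvALoop]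
theorem pvL_skip (a : String) (rest out : List String) (h : pvIsFlag a = false) :
    pvALoop (a :: rest) out = pvALoop rest out := by
  rw [pvALoop]; simp [h]

theorem pvL_last (a : String) (out : List String) (h : pvIsFlag a = true) :
    pvALoop [a] out = out ++ [a] := by
  rw [pvALoop]; simp [h]

theorem pvL_alone (a b : String) (rest out : List String) (h : pvIsFlag a = true)
    (h2 : (pvIsBool a || pvIsFlag b) = true) :
    pvALoop (a :: b :: rest) out = pvALoop (b :: rest) (out ++ [a]) := by
  rw [pvALoop]; simp [h, h2]

theorem pvL_pair (a b : String) (rest out : List String) (h : pvIsFlag a = true)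
    (h2 : (pvIsBool a || pvIsFlag b) = false) :
    pvALoop (a :: b :: rest) out = pvALoop rest (out ++ [a ++ " " ++ b]) := by
  rw [pvALoop]
  simp only [Bool.or_eq_false_iff] at h2
  simp [h, h2.1, h2.2]

theorem pvL_bool (a : String) (rest out : List String) (h : pvIsFlag a = true)
    (hb : pvIsBool a = true) :
    pvALoop (a :: rest) out = pvALoop rest (out ++ [a]) := by
  cases rest with
  | nil => rw [pvL_last a out h, pvL_nil]
  | cons b r => exact pvL_alone a b r out h (by simp [hb])

-- Main invariant, proved by one induction covering both machine states:
-- with no pending flag the B machine on l computes A's loop on l; with pending flag p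
-- (a flag token that is not a bool flag) it computes A's loop on p :: l.
theorem pvStep_inv (l : List String) :
    (∀ out, pvBFlush (l.foldl pvBStep (out, none)) = pvALoop l out) ∧
    (∀ out p, pvIsFlag p = true → pvIsBool p = false →
      pvBFlush (l.foldl pvBStep (out, some p)) = pvALoop (p :: l) out) := by
  induction l with
  | nil =>
    refine ⟨fun out => (pvL_nil out).symm, fun out p hp hb => ?_⟩
    rw [pvL_last p out hp]; rfl
  | cons a rest ih =>
    obtain ⟨ih1, ih2⟩ := ih
    constructor
    · intro out
      cases ha : pvIsFlag a with
      | false =>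
        rw [pvL_skip a rest out ha]
        simpa [List.foldl, pvBStep, ha] using ih1 out
      | true =>
        cases hab : pvIsBool a with
        | true =>
          rw [pvL_bool a rest out ha hab]
          simpa [List.foldl, pvBStep, ha, hab] using ih1 (out ++ [a])
        | false =>
          simpa [List.foldl, pvBStep, ha, hab] using ih2 out a ha hab
    · intro out p hp hb
      cases ha : pvIsFlag a with
      | false =>
        rw [pvL_pair p a rest out hp (by simp [hb, ha])]
        simpa [List.foldl, pvBStep, ha] using ih1 (out ++ [p ++ " " ++ a])
      | true =>
        rw [pvL_alone p a rest out hp (by simp [ha])]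
        cases hab : pvIsBool a with
        | true =>
          rw [pvL_bool a rest (out ++ [p]) ha hab]
          simpa [List.foldl, pvBStep, ha, hab] using ih1 (out ++ [p] ++ [a])
        | false =>
          simpa [List.foldl, pvBStep, ha, hab] using ih2 (out ++ [p]) a ha hab

-- ===== VERDICT (by name: the statement is the Claim_ definition above) =====
theorem args_to_text_py_spec : Claim_equal_args_to_text_py := by
  intro args _
  unfold Spec_args_to_text_py args_to_text_py args_to_text_py_alt
  rw [(pvStep_inv args).1 []]
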